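-- pv_equiv track=rewrite | github.com/PrinceSinghhub/Leet-Code | Leet Code/1806. Minimum Number of Operations to Reinitialize a Permutation.py | reinitializePermutation
-- ===== SOURCE A (Python) =====
-- def reinitializePermutation(n):
--
--     perm = [i for i in range(n)]
--     op = list(perm)
--     arr = [0] * n
--     c = 0
--     nn = n // 2
--
--     while arr != op:
--         for i in range(n):
--             if i % 2 == 0:
--                 arr[i] = perm[i // 2]
--             else:
--                 arr[i] = perm[int(nn + (i - 1) // 2)]
--         perm = list(arr)
--
--         c += 1
--     return c
-- ===== SOURCE B (Python) =====
-- def reinitializePermutation(n):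
--     # Track only where the element 1 travels: one step multiplies its position
--     # by 2 modulo n-1, so count steps of that single index instead of
--     # rebuilding the whole permutation each round.
--     if n <= 1:
--         return 0
--     if n == 2:
--         return 1
--     c = 0
--     i = 1
--     while True:
--         i = 2 * i % (n - 1)
--         c += 1
--         if i == 1:
--             return c
-- ===== Notes on version B (the rewrite author's own statement) =====
-- stated objective: alternative
-- what changed: Instead of rebuilding the whole n-element permutation each round until it equals the identity, B tracks only the position of element 1, which is multiplied by 2 modulo n-1 per round, counting rounds until it returns to 1 (O(1) work per round instead of O(n)); a timing run could not confirm a speed-up because it also samples odd n, where both programs loop forever.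
import Mathlib
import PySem

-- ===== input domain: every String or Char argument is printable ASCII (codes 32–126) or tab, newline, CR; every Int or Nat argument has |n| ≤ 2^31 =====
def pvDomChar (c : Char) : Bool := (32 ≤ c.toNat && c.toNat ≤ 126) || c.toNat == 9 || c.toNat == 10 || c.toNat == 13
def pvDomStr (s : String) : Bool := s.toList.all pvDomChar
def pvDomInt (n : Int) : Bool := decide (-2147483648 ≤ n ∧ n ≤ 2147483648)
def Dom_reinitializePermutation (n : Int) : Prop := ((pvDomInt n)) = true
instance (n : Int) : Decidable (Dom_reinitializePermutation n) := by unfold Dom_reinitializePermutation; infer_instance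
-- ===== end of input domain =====

-- B replaces A's whole-permutation simulation (a full list rebuild per round) by tracking only
-- the position of element 1 (one modular doubling per round); A's while loop is ported with fuel.

-- ===== PORT A =====
-- Python's mutable lists perm/arr/op are carried as Arrays (O(1) index/assign, as in Python);
-- every index read/written is nonnegative and in range on Pre_, where getD/setIfInBounds are
-- exactly Python's perm[j] / arr[i] = v.
-- one round of A's inner for-loop: arr[i] = perm[i//2] (i even) / perm[nn + (i-1)//2] (i odd)
def stepA (n nn : Int) (perm arr : Array Int) : Array Int :=
  (PySem.List.pyRange 0 n 1).foldl (fun a i =>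
    if PySem.Int.mod i 2 = 0 then
      a.setIfInBounds i.toNat (perm.getD (PySem.Int.floordiv i 2).toNat 0)
    else
      a.setIfInBounds i.toNat (perm.getD (nn + PySem.Int.floordiv (i - 1) 2).toNat 0)) arr

-- A's while loop; fuel n+1 always suffices on Pre_ (the order of 2 mod n-1 is < n-1)
def loopA (n nn : Int) (op : Array Int) : Array Int → Array Int → Int → Nat → Int
  | _, _, c, 0 => c
  | perm, arr, c, fuel + 1 =>
    if arr ≠ op then
      let arr' := stepA n nn perm arr
      loopA n nn op arr' arr' (c + 1) fuel
    else c

def reinitializePermutation (n : Int) : Int :=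
  let perm := (PySem.List.pyRange 0 n 1).toArray
  let op := perm
  let arr : Array Int := Array.replicate n.toNat 0
  let nn := PySem.Int.floordiv n 2
  loopA n nn op perm arr 0 (n.toNat + 1)

-- ===== PORT B =====
def loopB (m : Int) : Int → Int → Nat → Int
  | _, c, 0 => c
  | i, c, fuel + 1 =>
    let i' := PySem.Int.mod (2 * i) m
    let c' := c + 1
    if i' = 1 then c' else loopB m i' c' fuel

def reinitializePermutation_alt (n : Int) : Int :=
  if n ≤ 1 then 0
  else if n = 2 then 1
  else loopB (n - 1) 1 0 n.toNat

-- ===== PRECONDITION & SPEC =====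
-- Pre_ excludes odd n ≥ 3 (e.g. n = 3), on which A's while loop never terminates (no value is returned there; B diverges there too).
def Pre_reinitializePermutation (n : Int) : Prop := n ≤ 1 ∨ n % 2 = 0
instance (n : Int) : Decidable (Pre_reinitializePermutation n) := by
  unfold Pre_reinitializePermutation; infer_instance
def pvWitness_reinitializePermutation : Int := 6

def Spec_reinitializePermutation (n : Int) (out : Int) : Prop := out = reinitializePermutation_alt n
instance (n : Int) (out : Int) : Decidable (Spec_reinitializePermutation n out) := by
  unfold Spec_reinitializePermutation; infer_instance

-- ===== CLAIM (what is proved, stated in full; the proofs are below) =====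
def Claim_equal_reinitializePermutation : Prop := ∀ (n : Int), Dom_reinitializePermutation n → Pre_reinitializePermutation n → Spec_reinitializePermutation n (reinitializePermutation n)

-- ===== LEMMAS AND PROOFS =====

-- the index map of one round of A: new[i] = old[gN N i]
def gN (N : Nat) (i : Nat) : Nat := if i % 2 = 0 then i / 2 else N / 2 + (i - 1) / 2

-- A's permutation after k rounds, as a list
def permK (N k : Nat) : List Int := (List.range N).map (fun i => ((gN N)^[k] i : Int))

theorem gN_lt (N : Nat) (hN : 4 ≤ N) (hNe : N % 2 = 0) (i : Nat) (hi : i < N) :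
    gN N i < N := by
  unfold gN; split <;> omega

theorem getD_map_range' (N i : Nat) (f : Nat → Int) (hi : i < N) :
    ((List.range N).map f).getD i 0 = f i := by
  rw [List.getD_eq_getElem?_getD]
  simp [hi]

theorem arrayGetD_toList (a : Array Int) (i : Nat) (d : Int) :
    a.getD i d = a.toList.getD i d := by
  simp [Array.getD, List.getD_eq_getElem?_getD]
  split <;> simp_all

-- A's permutation after k rounds, as the Array the port carries
def permKA (N k : Nat) : Array Int := (permK N k).toArray

theorem getD_permK (N k i : Nat) (hi : i < N) :
    (permK N k).getD i 0 = ((gN N)^[k] i : Int) := by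
  unfold permK
  exact getD_map_range' N i _ hi

theorem foldl_set_prefix {α : Type} (f : Nat → α) (N : Nat) :
    ∀ (k : Nat) (arr : List α), k ≤ N → arr.length = N →
      (List.range k).foldl (fun a i => a.set i (f i)) arr
        = (List.range k).map f ++ arr.drop k := by
  intro k
  induction k with
  | zero => intro arr _ _; simp
  | succ k ih =>
    intro arr hk ha
    rw [List.range_succ, List.foldl_append, List.map_append]
    rw [ih arr (by omega) ha]
    have hdrop : arr.drop k = arr[k] :: arr.drop (k + 1) :=
      List.drop_eq_getElem_cons (by omega)
    simp only [List.foldl_cons, List.foldl_nil]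
    rw [hdrop, List.set_append_right _ _ (by simp)]
    simp only [List.length_map, List.length_range, Nat.sub_self, List.set_cons_zero,
      List.map_cons, List.map_nil, List.append_assoc, List.cons_append, List.nil_append]

theorem stepA_eq (N : Nat) (perm arr : Array Int) (ha : arr.size = N) :
    stepA (N : Int) (PySem.Int.floordiv (N : Int) 2) perm arr
      = ((List.range N).map (fun i => perm.toList.getD (gN N i) 0)).toArray := by
  apply Array.toList_inj.mp
  unfold stepA
  rw [PySem.List.pyRange_one]
  have hN0 : ((N : Int) - 0).toNat = N := by omega
  rw [hN0, List.foldl_map]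
  have hcomm : ∀ (x : Array Int) (y : Nat),
      x.toList.set y (perm.toList.getD (gN N y) 0)
        = (if PySem.Int.mod ((0 : Int) + (y : Int)) 2 = 0 then
              x.setIfInBounds ((0 : Int) + (y : Int)).toNat
                (perm.getD (PySem.Int.floordiv ((0 : Int) + (y : Int)) 2).toNat 0)
            else
              x.setIfInBounds ((0 : Int) + (y : Int)).toNat
                (perm.getD
                  (PySem.Int.floordiv (N : Int) 2
                    + PySem.Int.floordiv (((0 : Int) + (y : Int)) - 1) 2).toNat 0)).toList := by
    intro a k
    simp only [zero_add]
    symm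
    have hnn : PySem.Int.floordiv (N : Int) 2 = ((N / 2 : Nat) : Int) := by
      exact_mod_cast PySem.Int.floordiv_natCast N 2
    have hmodk : PySem.Int.mod (k : Int) 2 = ((k % 2 : Nat) : Int) := by
      exact_mod_cast PySem.Int.mod_natCast k 2
    have hdivk : PySem.Int.floordiv (k : Int) 2 = ((k / 2 : Nat) : Int) := by
      exact_mod_cast PySem.Int.floordiv_natCast k 2
    by_cases hk : k % 2 = 0
    · rw [if_pos]
      · rw [hdivk, Array.toList_setIfInBounds, arrayGetD_toList]
        simp only [Int.toNat_natCast]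
        simp [gN, hk]
      · rw [hmodk, hk]; rfl
    · rw [if_neg]
      · have hk1 : 1 ≤ k := by omega
        have hsub : ((k : Int)) - 1 = ((k - 1 : Nat) : Int) := by omega
        rw [hsub, hnn]
        have hdivk1 : PySem.Int.floordiv ((k - 1 : Nat) : Int) 2 = (((k - 1) / 2 : Nat) : Int) := by
          exact_mod_cast PySem.Int.floordiv_natCast (k - 1) 2
        rw [hdivk1]
        have hidx : ((N / 2 : Nat) : Int) + (((k - 1) / 2 : Nat) : Int)
            = ((N / 2 + (k - 1) / 2 : Nat) : Int) := by push_cast; ring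
        rw [hidx, Array.toList_setIfInBounds, arrayGetD_toList]
        simp only [Int.toNat_natCast]
        simp [gN, hk]
      · rw [hmodk]
        intro hc
        have : k % 2 = 0 := by exact_mod_cast hc
        exact hk this
  rw [← @List.foldl_hom _ _ _ Array.toList
    (fun (x : Array Int) (y : Nat) =>
      if PySem.Int.mod ((0 : Int) + (y : Int)) 2 = 0 then
        x.setIfInBounds ((0 : Int) + (y : Int)).toNat
          (perm.getD (PySem.Int.floordiv ((0 : Int) + (y : Int)) 2).toNat 0)
      else
        x.setIfInBounds ((0 : Int) + (y : Int)).toNat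
          (perm.getD
            (PySem.Int.floordiv (N : Int) 2
              + PySem.Int.floordiv (((0 : Int) + (y : Int)) - 1) 2).toNat 0))
    (fun (a : List Int) (k : Nat) => a.set k (perm.toList.getD (gN N k) 0))
    (List.range N) arr hcomm]
  rw [foldl_set_prefix (fun i => perm.toList.getD (gN N i) 0) N N arr.toList le_rfl
    (by simpa using ha)]
  simp [List.drop_eq_nil_of_le, ha]

theorem permK_succ (N k : Nat) (hN : 4 ≤ N) (hNe : N % 2 = 0) (arr : Array Int)
    (ha : arr.size = N) :
    stepA (N : Int) (PySem.Int.floordiv (N : Int) 2) (permKA N k) arr = permKA N (k + 1) := by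
  rw [stepA_eq N (permKA N k) arr ha]
  unfold permKA
  congr 1
  have htl : (permK N k).toArray.toList = permK N k := by simp
  rw [htl]
  unfold permK
  apply List.map_congr_left
  intro i hi
  rw [List.mem_range] at hi
  rw [getD_map_range' N (gN N i) _ (gN_lt N hN hNe i hi), Function.iterate_succ_apply]

theorem gN_top (N : Nat) (hN : 4 ≤ N) (hNe : N % 2 = 0) : gN N (N - 1) = N - 1 := by
  unfold gN; split <;> omega

theorem two_gN (N : Nat) (hN : 4 ≤ N) (hNe : N % 2 = 0) (i : Nat) (hi : i < N - 1) :
    (2 * gN N i) % (N - 1) = i ∧ gN N i < N - 1 := by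
  unfold gN
  split
  · refine ⟨?_, by omega⟩
    have h2 : 2 * (i / 2) = i := by omega
    rw [h2, Nat.mod_eq_of_lt hi]
  · refine ⟨?_, by omega⟩
    have h2 : 2 * (N / 2 + (i - 1) / 2) = i + (N - 1) := by omega
    rw [h2, Nat.add_mod_right, Nat.mod_eq_of_lt hi]

theorem iter_inv (N : Nat) (hN : 4 ≤ N) (hNe : N % 2 = 0) :
    ∀ (k i : Nat), i < N - 1 →
      (2 ^ k * (gN N)^[k] i) % (N - 1) = i ∧ (gN N)^[k] i < N - 1 := by
  intro k
  induction k with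
  | zero => intro i hi; exact ⟨by simpa using Nat.mod_eq_of_lt hi, by simpa using hi⟩
  | succ k ih =>
    intro i hi
    rw [Function.iterate_succ_apply]
    obtain ⟨hg1, hg2⟩ := two_gN N hN hNe i hi
    obtain ⟨ih1, ih2⟩ := ih (gN N i) hg2
    refine ⟨?_, ih2⟩
    have heq : 2 ^ (k + 1) * (gN N)^[k] (gN N i) = 2 * (2 ^ k * (gN N)^[k] (gN N i)) := by ring
    rw [heq]
    calc (2 * (2 ^ k * (gN N)^[k] (gN N i))) % (N - 1)
        = (2 * ((2 ^ k * (gN N)^[k] (gN N i)) % (N - 1))) % (N - 1) := by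
          conv_rhs => rw [Nat.mul_mod, Nat.mod_mod_of_dvd _ dvd_rfl, ← Nat.mul_mod]
      _ = (2 * gN N i) % (N - 1) := by rw [ih1]
      _ = i := hg1

theorem permK_eq_iff (N : Nat) (hN : 4 ≤ N) (hNe : N % 2 = 0) (k : Nat) :
    permK N k = permK N 0 ↔ 2 ^ k % (N - 1) = 1 := by
  constructor
  · intro h
    have h1 : (gN N)^[k] 1 = 1 := by
      have hc := congrArg (fun l => l.getD 1 0) h
      simp only [getD_permK N k 1 (by omega), getD_permK N 0 1 (by omega),
        Function.iterate_zero, id] at hc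
      exact_mod_cast hc
    have h2 := (iter_inv N hN hNe k 1 (by omega)).1
    rw [h1, Nat.mul_one] at h2
    exact h2
  · intro h
    unfold permK
    apply List.map_congr_left
    intro i hi
    rw [List.mem_range] at hi
    simp only [Function.iterate_zero, id]
    by_cases hiM : i < N - 1
    · obtain ⟨h1, h2⟩ := iter_inv N hN hNe k i hiM
      have hx : (2 ^ k * (gN N)^[k] i) % (N - 1) = ((gN N)^[k] i) % (N - 1) := by
        conv_lhs => rw [Nat.mul_mod, h, Nat.one_mul, Nat.mod_mod_of_dvd _ dvd_rfl]
      rw [h1, Nat.mod_eq_of_lt h2] at hx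
      rw [← hx]
    · have hieq : i = N - 1 := by omega
      rw [hieq, Function.iterate_fixed (gN_top N hN hNe)]

theorem permKA_eq_iff (N : Nat) (hN : 4 ≤ N) (hNe : N % 2 = 0) (k : Nat) :
    permKA N k = permKA N 0 ↔ 2 ^ k % (N - 1) = 1 := by
  rw [← permK_eq_iff N hN hNe k]
  unfold permKA
  constructor
  · intro h; simpa using congrArg Array.toList h
  · intro h; rw [h]

theorem loopA_run (N : Nat) (hN : 4 ≤ N) (hNe : N % 2 = 0) (ord : Nat)
    (hp : 2 ^ ord % (N - 1) = 1) (hmin : ∀ j, 0 < j → j < ord → 2 ^ j % (N - 1) ≠ 1) :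
    ∀ (fuel k : Nat), 1 ≤ k → k ≤ ord → ord + 1 ≤ k + fuel →
      loopA (N : Int) (PySem.Int.floordiv (N : Int) 2) (permKA N 0) (permKA N k) (permKA N k)
        (k : Int) fuel = (ord : Int) := by
  intro fuel
  induction fuel with
  | zero => intro k _ h1 h2; omega
  | succ fuel ih =>
    intro k hk1 hk2 hk3
    by_cases hko : k = ord
    · subst hko
      have heq : permKA N k = permKA N 0 := (permKA_eq_iff N hN hNe k).mpr hp
      simp [loopA, heq]
    · have hklt : k < ord := by omega
      have hne : permKA N k ≠ permKA N 0 := fun h =>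
        hmin k (by omega) hklt ((permKA_eq_iff N hN hNe k).mp h)
      rw [loopA]
      simp only [hne, ne_eq, not_false_eq_true, if_true]
      rw [permK_succ N k hN hNe _ (by simp [permKA, permK])]
      have hcast : (k : Int) + 1 = ((k + 1 : Nat) : Int) := by push_cast; ring
      rw [hcast]
      exact ih (k + 1) (by omega) (by omega) (by omega)

theorem loopB_run (M : Nat) (_hM : 3 ≤ M) (ord : Nat)
    (hp : 2 ^ ord % M = 1) (hmin : ∀ j, 0 < j → j < ord → 2 ^ j % M ≠ 1) :
    ∀ (fuel k : Nat), k < ord → ord ≤ k + fuel →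
      loopB (M : Int) ((2 ^ k % M : Nat) : Int) (k : Int) fuel = (ord : Int) := by
  intro fuel
  induction fuel with
  | zero => intro k h1 h2; omega
  | succ fuel ih =>
    intro k hk1 hk2
    rw [loopB]
    have hmod : PySem.Int.mod (2 * ((2 ^ k % M : Nat) : Int)) (M : Int)
        = ((2 ^ (k + 1) % M : Nat) : Int) := by
      have h1 : (2 * ((2 ^ k % M : Nat) : Int)) = (((2 * (2 ^ k % M) : Nat)) : Int) := by
        push_cast; ring
      rw [h1]
      have h2 : PySem.Int.mod (((2 * (2 ^ k % M) : Nat)) : Int) ((M : Nat) : Int)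
          = (((2 * (2 ^ k % M)) % M : Nat) : Int) := by
        exact_mod_cast PySem.Int.mod_natCast (2 * (2 ^ k % M)) M
      rw [h2]
      congr 1
      conv_rhs => rw [pow_succ, mul_comm]
      conv_lhs => rw [Nat.mul_mod, Nat.mod_mod_of_dvd _ dvd_rfl, ← Nat.mul_mod]
    simp only [hmod]
    by_cases hc : 2 ^ (k + 1) % M = 1
    · rw [if_pos]
      · have hle : ord ≤ k + 1 := by
          by_contra hlt
          exact hmin (k + 1) (by omega) (by omega) hc
        have : ord = k + 1 := by omega
        rw [this]; push_cast; ring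
      · rw [hc]; rfl
    · rw [if_neg]
      · have hlt : k + 1 < ord := by
          rcases Nat.lt_or_ge (k + 1) ord with h | h
          · exact h
          · exfalso
            have : ord = k + 1 := by omega
            rw [this] at hp
            exact hc hp
        have hcast : (k : Int) + 1 = ((k + 1 : Nat) : Int) := by push_cast; ring
        rw [hcast]
        exact ih (k + 1) hlt (by omega)
      · intro hceq
        have : 2 ^ (k + 1) % M = 1 := by exact_mod_cast hceq
        exact hc this

theorem main_even (N : Nat) (hN : 4 ≤ N) (hNe : N % 2 = 0) :
    reinitializePermutation (N : Int) = reinitializePermutation_alt (N : Int) := by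
  have hM3 : 3 ≤ N - 1 := by omega
  have hcop : Nat.Coprime 2 (N - 1) := by
    rw [Nat.coprime_two_left]
    exact Nat.odd_iff.mpr (by omega)
  have heuler : 2 ^ Nat.totient (N - 1) % (N - 1) = 1 := by
    have h := Nat.ModEq.pow_totient hcop
    unfold Nat.ModEq at h
    rw [h, Nat.mod_eq_of_lt (by omega)]
  have hex : ∃ j, 0 < j ∧ 2 ^ j % (N - 1) = 1 :=
    ⟨Nat.totient (N - 1), Nat.totient_pos.mpr (by omega), heuler⟩
  obtain ⟨hpos, hp⟩ := Nat.find_spec hex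
  have hmin : ∀ j, 0 < j → j < Nat.find hex → 2 ^ j % (N - 1) ≠ 1 := fun j hj hlt hc =>
    Nat.find_min hex hlt ⟨hj, hc⟩
  have hordle : Nat.find hex ≤ N - 2 := by
    have h1 : Nat.find hex ≤ Nat.totient (N - 1) :=
      Nat.find_min' hex ⟨Nat.totient_pos.mpr (by omega), heuler⟩
    have h2 : Nat.totient (N - 1) < N - 1 := Nat.totient_lt (N - 1) (by omega)
    omega
  have hB : reinitializePermutation_alt (N : Int) = ((Nat.find hex : Nat) : Int) := by
    unfold reinitializePermutation_alt
    rw [if_neg (by exact_mod_cast by omega : ¬((N : Int) ≤ 1)),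
        if_neg (by exact_mod_cast by omega : ¬((N : Int) = 2))]
    have h1 : (N : Int) - 1 = ((N - 1 : Nat) : Int) := by omega
    have h2 : (1 : Int) = ((2 ^ 0 % (N - 1) : Nat) : Int) := by
      rw [pow_zero, Nat.mod_eq_of_lt (by omega)]; rfl
    have h3 : (0 : Int) = ((0 : Nat) : Int) := rfl
    have h4 : (N : Int).toNat = N := by omega
    rw [h1, h2, h3, h4]
    exact loopB_run (N - 1) hM3 (Nat.find hex) hp hmin N 0 hpos (by omega)
  have hop : (PySem.List.pyRange 0 (N : Int) 1).toArray = permKA N 0 := by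
    unfold permKA
    congr 1
    rw [PySem.List.pyRange_one]
    simp [permK]
  have hA : reinitializePermutation (N : Int) = ((Nat.find hex : Nat) : Int) := by
    unfold reinitializePermutation
    simp only [Int.toNat_natCast, hop]
    rw [loopA]
    have hneq : Array.replicate N (0 : Int) ≠ permKA N 0 := by
      intro h
      have hc := congrArg (fun (a : Array Int) => a.toList.getD 1 0) h
      simp only [permKA] at hc
      rw [show (Array.replicate N (0 : Int)).toList = List.replicate N 0 by simp] at hc
      rw [getD_permK N 0 1 (by omega)] at hc
      have h1N : 1 < N := by omega
      simp [List.getD_eq_getElem?_getD, h1N, Function.iterate_zero] at hc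
    simp only [hneq, ne_eq, not_false_eq_true, if_true]
    rw [permK_succ N 0 hN hNe _ (by simp)]
    rw [show (0 : Int) + 1 = ((1 : Nat) : Int) by norm_num]
    exact loopA_run N hN hNe (Nat.find hex) hp hmin N 1 le_rfl (by omega) (by omega)
  rw [hA, hB]

-- ===== VERDICT (by name: the statement is the Claim_ definition above) =====
theorem reinitializePermutation_spec : Claim_equal_reinitializePermutation := by
  intro n _ hpre
  unfold Spec_reinitializePermutation
  by_cases h0 : n ≤ 0
  · have ht : n.toNat = 0 := by omega
    have hr : PySem.List.pyRange 0 n 1 = [] := PySem.List.pyRange_one_eq_nil (by omega)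
    simp [reinitializePermutation, reinitializePermutation_alt, ht, hr, loopA,
      show n ≤ 1 by omega]
  · by_cases h1 : n = 1
    · subst h1; decide
    · by_cases h2 : n = 2
      · subst h2; decide
      · have he : n % 2 = 0 := by
          rcases hpre with h | h
          · omega
          · exact h
        have hn4 : 4 ≤ n := by omega
        obtain ⟨N, rfl⟩ : ∃ N : Nat, n = (N : Int) :=
          ⟨n.toNat, (Int.toNat_of_nonneg (by omega)).symm⟩
        exact main_even N (by omega) (by omega)
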